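-- pv_equiv track=rewrite | github.com/ym1522/Algorithm-study | 김수빈/2164_bj.py | solution
-- ===== SOURCE A (Python) =====
-- def solution(N):
--     nums = list(range(1, N + 1))
--     del_last = False
--     while len(nums) > 1:
--         if not del_last:
--             indices = list(filter(lambda x: x % 2 > 0, range(len(nums))))
--         else:
--             indices = list(filter(lambda x: x % 2 == 0, range(len(nums))))
--         last = nums[-1]
--         nums = list(map(lambda x: nums[x], indices))
--         del_last = not last in nums
--     return nums[0]
-- ===== SOURCE B (Python) =====
-- def solution(N):
--     # Closed form for the card-queue survivor: with p the largest power of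
--     # two <= N, the answer is N itself if N is a power of two, else 2*(N - p).
--     p = 1
--     while p * 2 <= N:
--         p *= 2
--     if p == N:
--         return N
--     return 2 * (N - p)
-- ===== Notes on version B (the rewrite author's own statement) =====
-- stated objective: faster
-- what changed: Replaces the round-by-round simulation of the card queue (rebuilding the list of survivors each pass) with the Josephus closed form: find the largest power of two p <= N and return N if p == N else 2*(N - p).
import Mathlib
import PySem

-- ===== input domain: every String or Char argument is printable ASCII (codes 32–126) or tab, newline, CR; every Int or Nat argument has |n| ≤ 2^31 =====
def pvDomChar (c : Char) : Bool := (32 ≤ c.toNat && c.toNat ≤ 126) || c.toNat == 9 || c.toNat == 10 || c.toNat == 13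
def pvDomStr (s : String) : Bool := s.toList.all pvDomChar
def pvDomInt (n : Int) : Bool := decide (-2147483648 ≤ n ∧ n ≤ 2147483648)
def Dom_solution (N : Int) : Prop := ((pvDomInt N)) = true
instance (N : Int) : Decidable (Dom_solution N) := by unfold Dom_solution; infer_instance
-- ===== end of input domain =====

-- B replaces A's round-by-round simulation of the card queue with the Josephus
-- closed form (largest power of two p ≤ N; answer N if p = N else 2*(N-p)): faster.

-- ===== PORT A =====
-- length lemmas about the two index filters, cited by loopA's decreasing_by
theorem filter_odd_range (n : Nat) :
    (List.range n).filter (fun x => x % 2 == 1) = (List.range (n / 2)).map (fun j => 2 * j + 1) := by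
  induction n with
  | zero => simp
  | succ n ih =>
    rcases Nat.mod_two_eq_zero_or_one n with h | h
    · have h2 : (n + 1) / 2 = n / 2 := by omega
      -- h : n % 2 = 0
      have hb : (n % 2 == 1) = false := by
        simp [h]
      simp [List.range_succ, List.filter_append, ih, hb, h2]
    · have h2 : (n + 1) / 2 = n / 2 + 1 := by omega
      have hb : (n % 2 == 1) = true := by
        simp [h]
      have hn : 2 * (n / 2) + 1 = n := by omega
      simp [List.range_succ, List.filter_append, ih, hb, h2, List.map_append, hn]

theorem filter_even_range (n : Nat) :
    (List.range n).filter (fun x => x % 2 == 0) = (List.range ((n + 1) / 2)).map (fun j => 2 * j) := by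
  induction n with
  | zero => simp
  | succ n ih =>
    rcases Nat.mod_two_eq_zero_or_one n with h | h
    · have h2 : (n + 1 + 1) / 2 = (n + 1) / 2 + 1 := by omega
      have hb : (n % 2 == 0) = true := by
        simp [h]
      have hn : 2 * ((n + 1) / 2) = n := by omega
      simp [List.range_succ, List.filter_append, ih, hb, h2, List.map_append, hn]
    · have h2 : (n + 1 + 1) / 2 = (n + 1) / 2 := by omega
      have hb : (n % 2 == 0) = false := by
        simp [h]
      simp [List.range_succ, List.filter_append, ih, hb, h2]

-- the while loop of A: one recursive step per pass over the surviving cards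
def loopA (nums : List Int) (del_last : Bool) : List Int :=
  if h : nums.length > 1 then
    let indices := if !del_last
      then (List.range nums.length).filter (fun x => x % 2 == 1)  -- x % 2 > 0 on these nonneg ints
      else (List.range nums.length).filter (fun x => x % 2 == 0)
    let last := (PySem.List.pyGet? nums (-1)).getD 0   -- nums[-1]; in range since length > 1
    let arr := nums.toArray                            -- Python lists index in O(1); an Array gives the same reads
    let nums' := indices.map (fun x => arr.getD x 0)   -- nums[x]; every index is < length
    loopA nums' (!(nums'.contains last))
  else nums
termination_by nums.length
decreasing_by
  simp only [List.length_map, filter_odd_range, filter_even_range]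
  split <;> simp <;> omega

def solution (N : Int) : Int :=
  let nums := PySem.List.pyRange 1 (N + 1) 1
  (PySem.List.pyGet? (loopA nums false) 0).getD 0   -- nums[0]; IndexError (N ≤ 0) excluded by Pre_

-- ===== PORT B =====
-- the while loop of B: double p while p * 2 ≤ N (the 1 ≤ p guard only makes the recursion total; p starts at 1)
def altLoop (N p : Int) : Int :=
  if h : p * 2 ≤ N ∧ 1 ≤ p then altLoop N (p * 2) else p
termination_by (N - p).toNat
decreasing_by omega

def solution_alt (N : Int) : Int :=
  let p := altLoop N 1
  if p == N then N else 2 * (N - p)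

-- ===== PRECONDITION & SPEC =====
-- Pre_ excludes N ≤ 0, where A's nums[0] raises IndexError on the empty list
def Pre_solution (N : Int) : Prop := 1 ≤ N
instance (N : Int) : Decidable (Pre_solution N) := by unfold Pre_solution; infer_instance
def pvWitness_solution : Int := 6

def Spec_solution (N : Int) (out : Int) : Prop := out = solution_alt N
instance (N : Int) (out : Int) : Decidable (Spec_solution N out) := by unfold Spec_solution; infer_instance

-- ===== CLAIM (what is proved, stated in full; the proofs are below) =====
def Claim_equal_solution : Prop := ∀ (N : Int), Dom_solution N → Pre_solution N → Spec_solution N (solution N)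

-- ===== LEMMAS AND PROOFS =====

-- abstract survivor index recursion: sJ k del = 1-indexed survivor of [1..k]
def sJ (k : Nat) (del : Bool) : Nat :=
  if k ≤ 1 then 1
  else if del then 2 * sJ ((k + 1) / 2) (decide (k % 2 = 0)) - 1
  else 2 * sJ (k / 2) (decide (k % 2 = 1))
termination_by k
decreasing_by all_goals omega

theorem sJ_pos (k : Nat) (del : Bool) : 1 ≤ sJ k del := by
  induction k using Nat.strong_induction_on generalizing del with
  | _ k ih =>
    unfold sJ
    split
    · omega
    · split
      · have := ih ((k + 1) / 2) (by omega) (decide (k % 2 = 0))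
        omega
      · have := ih (k / 2) (by omega) (decide (k % 2 = 1))
        omega

-- arithmetic progression of length k, start a, step d
def ap (a d : Int) (k : Nat) : List Int := (List.range k).map (fun i : Nat => a + d * (i : Int))

theorem ap_length (a d : Int) (k : Nat) : (ap a d k).length = k := by simp [ap]

theorem ap_snoc (a d : Int) (k : Nat) : ap a d (k + 1) = ap a d k ++ [a + d * (k : Int)] := by
  simp [ap, List.range_succ]

theorem ap_getD (a d : Int) (k i : Nat) (h : i < k) : (ap a d k).getD i 0 = a + d * (i : Int) := by
  rw [List.getD_eq_getElem _ _ (by simpa [ap_length])]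
  simp [ap]

theorem ap_last (a d : Int) (k : Nat) (h : 1 ≤ k) :
    (PySem.List.pyGet? (ap a d k) (-1)).getD 0 = a + d * ((k : Int) - 1) := by
  obtain ⟨k', rfl⟩ : ∃ k', k = k' + 1 := ⟨k - 1, by omega⟩
  rw [ap_snoc, PySem.List.pyGet?_neg_one_append_singleton]
  simp

theorem toArray_getD_eq (l : List Int) (i : Nat) (d : Int) : l.toArray.getD i d = l.getD i d := by
  simp [Array.getD, List.getD]
  split <;> simp_all

theorem ap_map_odd (a d : Int) (k : Nat) :
    ((List.range k).filter (fun x => x % 2 == 1)).map (fun x => (ap a d k).toArray.getD x 0) =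
      ap (a + d) (2 * d) (k / 2) := by
  rw [filter_odd_range, List.map_map]
  rw [show ap (a + d) (2 * d) (k / 2) = (List.range (k / 2)).map (fun i : Nat => (a + d) + 2 * d * (i : Int)) from rfl]
  apply List.map_congr_left
  intro j hj
  rw [List.mem_range] at hj
  simp only [Function.comp]
  rw [toArray_getD_eq, ap_getD _ _ _ _ (by omega)]
  push_cast
  ring

theorem ap_map_even (a d : Int) (k : Nat) :
    ((List.range k).filter (fun x => x % 2 == 0)).map (fun x => (ap a d k).toArray.getD x 0) =
      ap a (2 * d) ((k + 1) / 2) := by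
  rw [filter_even_range, List.map_map]
  rw [show ap a (2 * d) ((k + 1) / 2) = (List.range ((k + 1) / 2)).map (fun i : Nat => a + 2 * d * (i : Int)) from rfl]
  apply List.map_congr_left
  intro j hj
  rw [List.mem_range] at hj
  simp only [Function.comp]
  rw [toArray_getD_eq, ap_getD _ _ _ _ (by omega)]
  push_cast
  ring

theorem mem_ap_iff (a' d a d' : Int) (k k' : Nat) :
    (a + d * ((k : Int) - 1)) ∈ ap a' d' k' ↔
      ∃ j : Nat, j < k' ∧ a' + d' * (j : Int) = a + d * ((k : Int) - 1) := by
  simp [ap, List.mem_map, List.mem_range]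

theorem contains_odd (a d : Int) (k : Nat) (hd : 1 ≤ d) (hk : 2 ≤ k) :
    ((ap (a + d) (2 * d) (k / 2)).contains (a + d * ((k : Int) - 1))) = decide (k % 2 = 0) := by
  by_cases hpar : k % 2 = 0
  · simp only [hpar, decide_true]
    rw [List.contains_iff_mem, mem_ap_iff]
    refine ⟨(k - 2) / 2, by omega, ?_⟩
    have h2 : 2 * (((k - 2) / 2 : Nat) : Int) = (k : Int) - 2 := by omega
    linear_combination d * h2
  · simp only [hpar, decide_false]
    rw [← Bool.not_eq_true, List.contains_iff_mem, mem_ap_iff]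
    rintro ⟨j, hj, he⟩
    have h' : d * (2 * (j : Int) + 1) = d * ((k : Int) - 1) := by linear_combination he
    have := mul_left_cancel₀ (by omega : d ≠ 0) h'
    omega

theorem contains_even (a d : Int) (k : Nat) (hd : 1 ≤ d) (hk : 2 ≤ k) :
    ((ap a (2 * d) ((k + 1) / 2)).contains (a + d * ((k : Int) - 1))) = decide (k % 2 = 1) := by
  by_cases hpar : k % 2 = 1
  · simp only [hpar, decide_true]
    rw [List.contains_iff_mem, mem_ap_iff]
    refine ⟨(k - 1) / 2, by omega, ?_⟩
    have h2 : 2 * (((k - 1) / 2 : Nat) : Int) = (k : Int) - 1 := by omega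
    linear_combination d * h2
  · simp only [hpar, decide_false]
    rw [← Bool.not_eq_true, List.contains_iff_mem, mem_ap_iff]
    rintro ⟨j, hj, he⟩
    have h' : d * (2 * (j : Int)) = d * ((k : Int) - 1) := by linear_combination he
    have := mul_left_cancel₀ (by omega : d ≠ 0) h'
    omega

theorem loopA_ap (k : Nat) (a d : Int) (hd : 1 ≤ d) (hk : 1 ≤ k) (del : Bool) :
    loopA (ap a d k) del = [a + d * ((sJ k del : Int) - 1)] := by
  induction k using Nat.strong_induction_on generalizing a d del with
  | _ k ih =>
    by_cases h2 : k ≤ 1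
    · have hk1 : k = 1 := by omega
      subst hk1
      rw [loopA, dif_neg (by rw [ap_length]; omega), sJ]
      simp [ap, List.range_succ]
    · have hgt : (ap a d k).length > 1 := by rw [ap_length]; omega
      rw [loopA, dif_pos hgt]
      simp only [ap_length, ap_last a d k (by omega)]
      cases del with
      | false =>
        rw [if_pos (by simp)]
        rw [ap_map_odd, contains_odd a d k hd (by omega)]
        have hdel : (!decide (k % 2 = 0)) = decide (k % 2 = 1) := by
          rcases Nat.mod_two_eq_zero_or_one k with h | h <;> simp [h]
        rw [hdel, ih (k / 2) (by omega) (a + d) (2 * d) (by omega) (by omega)]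
        have hsJ : sJ k false = 2 * sJ (k / 2) (decide (k % 2 = 1)) := by
          rw [sJ, if_neg h2, if_neg (by simp)]
        rw [hsJ]
        congr 1
        push_cast
        ring
      | true =>
        rw [if_neg (by simp)]
        rw [ap_map_even, contains_even a d k hd (by omega)]
        have hdel : (!decide (k % 2 = 1)) = decide (k % 2 = 0) := by
          rcases Nat.mod_two_eq_zero_or_one k with h | h <;> simp [h]
        rw [hdel, ih ((k + 1) / 2) (by omega) a (2 * d) (by omega) (by omega)]
        have hsJ : sJ k true = 2 * sJ ((k + 1) / 2) (decide (k % 2 = 0)) - 1 := by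
          rw [sJ, if_neg h2, if_pos rfl]
        have := sJ_pos ((k + 1) / 2) (decide (k % 2 = 0))
        have hcast : ((sJ k true : Nat) : Int) =
            2 * (sJ ((k + 1) / 2) (decide (k % 2 = 0)) : Int) - 1 := by rw [hsJ]; omega
        rw [hcast]
        congr 1
        ring

-- closed form for sJ
theorem sJ_closed (n : Nat) : ∀ p L : Nat, (∃ m : Nat, p = 2 ^ m) → n = p + L → L < p →
    sJ n false = (if L = 0 then n else 2 * L) ∧ sJ n true = 2 * L + 1 := by
  induction n using Nat.strong_induction_on with
  | _ n ih =>
    rintro p L ⟨m, hm⟩ hn hL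
    have hp1 : 1 ≤ p := hm ▸ Nat.one_le_two_pow
    by_cases h1 : n ≤ 1
    · obtain ⟨hp', hL', hn'⟩ : p = 1 ∧ L = 0 ∧ n = 1 := by omega
      subst hL'; subst hn'
      constructor <;> (rw [sJ]; simp)
    · -- n ≥ 2, so m ≥ 1 and p = 2 * q with q = 2 ^ (m - 1)
      have hm1 : 1 ≤ m := by
        rcases Nat.eq_zero_or_pos m with h0 | h0
        · subst h0; simp at hm; omega
        · exact h0
      have hq2 : p = 2 * 2 ^ (m - 1) := by
        rw [hm, ← pow_succ']; congr 1; omega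
      have hq1 : 1 ≤ 2 ^ (m - 1) := Nat.one_le_two_pow
      have hqpow : ∃ m' : Nat, 2 ^ (m - 1) = 2 ^ m' := ⟨m - 1, rfl⟩
      generalize hQ : 2 ^ (m - 1) = q at hq2 hq1 hqpow
      constructor
      · rw [sJ, if_neg h1, if_neg (by simp)]
        rcases Nat.mod_two_eq_zero_or_one L with hLp | hLp
        · rw [show (decide (n % 2 = 1)) = false by simp; omega]
          have := (ih (n / 2) (by omega) q (L / 2) hqpow (by omega) (by omega)).1
          rw [this]; split_ifs <;> omega
        · rw [show (decide (n % 2 = 1)) = true by simp; omega]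
          have := (ih (n / 2) (by omega) q (L / 2) hqpow (by omega) (by omega)).2
          rw [this]; split_ifs <;> omega
      · rw [sJ, if_neg h1, if_pos rfl]
        by_cases hLtop : L = 2 * q - 1
        · rw [show (decide (n % 2 = 0)) = false by simp; omega]
          have := (ih ((n + 1) / 2) (by omega) (2 * q) 0 (by obtain ⟨m', hm'⟩ := hqpow; exact ⟨m' + 1, by rw [hm', ← pow_succ']⟩) (by omega) (by omega)).1
          rw [if_pos rfl] at this
          rw [this]; omega
        · rcases Nat.mod_two_eq_zero_or_one L with hLp | hLp
          · rw [show (decide (n % 2 = 0)) = true by simp; omega]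
            have := (ih ((n + 1) / 2) (by omega) q ((L + 1) / 2) hqpow (by omega) (by omega)).2
            rw [this]; omega
          · rw [show (decide (n % 2 = 0)) = false by simp; omega]
            have := (ih ((n + 1) / 2) (by omega) q ((L + 1) / 2) hqpow (by omega) (by omega)).1
            rw [this]; split_ifs <;> omega

theorem altLoop_spec_aux (N : Int) (fuel : Nat) : ∀ p : Int, (N - p).toNat ≤ fuel → 1 ≤ p → p ≤ N →
    (∃ m : Nat, p = 2 ^ m) → ∃ P : Int, altLoop N p = P ∧ (∃ m : Nat, P = 2 ^ m) ∧ P ≤ N ∧ N < 2 * P := by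
  induction fuel with
  | zero =>
    intro p hf h1 h2 hpow
    have hNp : ¬ (p * 2 ≤ N ∧ 1 ≤ p) := by omega
    rw [altLoop, dif_neg hNp]
    exact ⟨p, rfl, hpow, h2, by omega⟩
  | succ f ih =>
    intro p hf h1 h2 hpow
    rw [altLoop]
    split
    · next hc =>
      obtain ⟨m, hm⟩ := hpow
      refine ih (p * 2) (by omega) (by omega) (by omega) ⟨m + 1, ?_⟩
      rw [hm]; ring
    · next hc => exact ⟨p, rfl, hpow, h2, by omega⟩

theorem altLoop_spec (N : Int) (h : 1 ≤ N) :
    ∃ P : Int, altLoop N 1 = P ∧ (∃ m : Nat, P = 2 ^ m) ∧ P ≤ N ∧ N < 2 * P :=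
  altLoop_spec_aux N (N - 1).toNat 1 (by omega) (by omega) h ⟨0, by norm_num⟩

-- ===== VERDICT (by name: the statement is the Claim_ definition above) =====
theorem solution_A_val (N : Int) (h : 1 ≤ N) : solution N = (sJ N.toNat false : Int) := by
  unfold solution
  have hrange : PySem.List.pyRange 1 (N + 1) 1 = ap 1 1 N.toNat := by
    rw [PySem.List.pyRange_one]
    rw [show (N + 1 - 1) = N from by ring]
    rw [show ap 1 1 N.toNat = (List.range N.toNat).map (fun i : Nat => 1 + 1 * (i : Int)) from rfl]
    apply List.map_congr_left
    intro j _
    ring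
  rw [hrange]
  show (PySem.List.pyGet? (loopA (ap 1 1 N.toNat) false) 0).getD 0 = _
  rw [loopA_ap N.toNat 1 1 (by omega) (by omega) false]
  rw [PySem.List.pyGet?_zero_cons]
  simp

theorem solution_spec : Claim_equal_solution := by
  intro N _ hPre
  unfold Pre_solution at hPre
  unfold Spec_solution
  rw [solution_A_val N hPre]
  obtain ⟨P, hP, ⟨m, hm⟩, hP1, hP2⟩ := altLoop_spec N hPre
  unfold solution_alt
  rw [hP]
  have hPpos : 1 ≤ P := by
    have : (0 : Int) < 2 ^ m := by positivity
    omega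
  have hn : ((N.toNat : Nat) : Int) = N := by omega
  have hQ : ((P.toNat : Nat) : Int) = P := by omega
  have hpow : ∃ m' : Nat, P.toNat = 2 ^ m' := by
    refine ⟨m, ?_⟩
    have h2 : ((P.toNat : Nat) : Int) = (((2 ^ m : Nat) : Nat) : Int) := by
      rw [hQ, hm]; push_cast; ring
    omega
  have hsj := (sJ_closed N.toNat P.toNat (N.toNat - P.toNat) hpow (by omega) (by omega)).1
  by_cases hL : N.toNat - P.toNat = 0
  · have hPN : P = N := by omega
    rw [if_pos (by simp [hPN])]
    rw [if_pos hL] at hsj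
    rw [hsj]
    omega
  · have hPN : P ≠ N := by omega
    rw [if_neg (by simp [hPN])]
    rw [if_neg hL] at hsj
    rw [hsj]
    push_cast
    omega
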